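-- pv_equiv track=rewrite | github.com/SeungjipLee/Algorithm | 배준형/Week1/Pro_Lv2.석유 시추.py | solution
-- ===== SOURCE A (Python) =====
-- from collections import deque
--
-- def solution(land):
--     n = len(land)
--     m = len(land[0])
--     oil_nums = [[0] * m for _ in range(n)]
--
--     answer = 0
--     oil_area = 1
--     oil_count = {}
--
--     for i in range(n):
--         for j in range(m):
--             if land[i][j] == 0:
--                 continue
--             if oil_nums[i][j] != 0:
--                 continue
--
--             q = deque()
--             oil_nums[i][j] = oil_area
--             q.append([i, j])
--             cnt = 1
--
--             while q:
--                 x, y = q.popleft()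
--                 for dx, dy in [[0, 1], [0, -1], [1, 0], [-1, 0]]:
--                     nx, ny = x+dx, y+dy
--                     if nx < 0 or nx >= n or ny < 0 or ny >= m:
--                         continue
--                     if land[nx][ny] == 0:
--                         continue
--                     if oil_nums[nx][ny]:
--                         continue
--                     oil_nums[nx][ny] = oil_area
--                     q.append([nx, ny])
--                     cnt += 1
--             oil_count[oil_area] = cnt
--             oil_area += 1
--
--     for sichu in range(m):
--         oils = []
--         oil_amount = 0
--         for i in range(n):
--             pass
--             if oil_nums[i][sichu] and oil_nums[i][sichu] not in oils:
--                 oils.append(oil_nums[i][sichu])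
--
--         for oil in oils:
--             oil_amount += oil_count[oil]
--
--         answer = max(oil_amount, answer)
--
--     return answer
-- ===== SOURCE B (Python) =====
-- def solution(land):
--     n = len(land)
--     m = len(land[0])
--     best = 0
--     for c in range(m):
--         filled = {(i, c) for i in range(n) if land[i][c]}
--         frontier = filled
--         while frontier:
--             new = set()
--             for x, y in frontier:
--                 for nx, ny in ((x, y + 1), (x, y - 1), (x + 1, y), (x - 1, y)):
--                     if 0 <= nx < n and 0 <= ny < m and land[nx][ny] and (nx, ny) not in filled:
--                         new.add((nx, ny))
--             filled |= new
--             frontier = new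
--         best = max(best, len(filled))
--     return best
-- ===== Notes on version B (the rewrite author's own statement) =====
-- stated objective: simpler
-- what changed: Replaces the global BFS component labeling with a size dictionary plus a per-column label-dedup-and-sum pass by one independent multi-source frontier flood fill per column whose filled-set size is directly that column's total.
import Mathlib
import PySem

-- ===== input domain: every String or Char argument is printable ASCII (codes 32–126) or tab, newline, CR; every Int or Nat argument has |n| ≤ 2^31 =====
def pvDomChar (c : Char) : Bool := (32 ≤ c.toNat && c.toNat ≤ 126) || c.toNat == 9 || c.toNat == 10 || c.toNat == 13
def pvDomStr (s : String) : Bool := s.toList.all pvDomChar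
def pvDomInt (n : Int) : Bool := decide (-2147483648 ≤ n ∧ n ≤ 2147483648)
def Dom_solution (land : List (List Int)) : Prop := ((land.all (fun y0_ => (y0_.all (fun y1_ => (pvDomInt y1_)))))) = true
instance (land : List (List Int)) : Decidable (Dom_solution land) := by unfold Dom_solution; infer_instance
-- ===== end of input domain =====

-- Port equivalence: A labels components by BFS with a size dict and dedups labels per column;
-- B runs one multi-source frontier flood fill per column and takes the filled set's size (simpler: no labeling, no dict).


-- ===== PORT A =====
-- land[i][j] read (total form; Pre_ keeps every Python access in range)
def cellA (g : List (List Int)) (i j : Int) : Int :=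
  PySem.List.pyGetD (PySem.List.pyGetD g i []) j 0

-- oil_nums[i][j] = v
def gsetA (g : List (List Int)) (i j v : Int) : List (List Int) :=
  PySem.List.pySetD g i (PySem.List.pySetD (PySem.List.pyGetD g i []) j v)

-- one neighbour test of A's BFS body, state = (oil_nums, queue, cnt)
def bfsStepA (land : List (List Int)) (n m area x y : Int)
    (s : List (List Int) × List (Int × Int) × Int) (d : Int × Int) :
    List (List Int) × List (Int × Int) × Int :=
  let nx := x + d.1
  let ny := y + d.2
  if nx < 0 ∨ n ≤ nx ∨ ny < 0 ∨ m ≤ ny then s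
  else if cellA land nx ny = 0 then s
  else if cellA s.1 nx ny ≠ 0 then s
  else (gsetA s.1 nx ny area, s.2.1 ++ [(nx, ny)], s.2.2 + 1)

-- `while q:` of A (fuel only makes the loop total; it is never exhausted)
def bfsA (land : List (List Int)) (n m area : Int) :
    Nat → List (List Int) → List (Int × Int) → Int → List (List Int) × Int
  | 0, g, _, cnt => (g, cnt)
  | fuel + 1, g, q, cnt =>
    match q with
    | [] => (g, cnt)
    | (x, y) :: rest =>
      let s := [((0:Int), (1:Int)), (0, -1), (1, 0), (-1, 0)].foldl
                 (bfsStepA land n m area x y) (g, rest, cnt)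
      bfsA land n m area fuel s.1 s.2.1 s.2.2

-- body of the double scan, state = (oil_nums, oil_count, oil_area)
def scanCellA (land : List (List Int)) (n m : Int)
    (st : List (List Int) × PySem.Dict Int Int × Int) (ij : Int × Int) :
    List (List Int) × PySem.Dict Int Int × Int :=
  if cellA land ij.1 ij.2 = 0 then st
  else if cellA st.1 ij.1 ij.2 ≠ 0 then st
  else
    let r := bfsA land n m st.2.2 (n.toNat * m.toNat + 1) (gsetA st.1 ij.1 ij.2 st.2.2) [ij] 1
    (r.1, st.2.1.insert st.2.2 r.2, st.2.2 + 1)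

def solution (land : List (List Int)) : Int :=
  let n : Int := PySem.List.len land
  let m : Int := PySem.List.len ((PySem.List.pyGet? land 0).getD [])
  let oil_nums0 : List (List Int) :=
    (PySem.List.pyRange 0 n 1).map (fun _ => List.replicate m.toNat (0 : Int))
  let st := (PySem.List.pyRange 0 n 1).foldl
      (fun st i => (PySem.List.pyRange 0 m 1).foldl
        (fun st j => scanCellA land n m st (i, j)) st)
      (oil_nums0, PySem.Dict.empty, 1)
  (PySem.List.pyRange 0 m 1).foldl (fun ans c =>
      let oils := (PySem.List.pyRange 0 n 1).foldl (fun os i =>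
          if cellA st.1 i c ≠ 0 ∧ ¬ (cellA st.1 i c) ∈ os then os ++ [cellA st.1 i c] else os) []
      -- oil_count[oil]: the key is always present (labels in the grid were all recorded), so getD is exact
      let amount := oils.foldl (fun a o => a + st.2.1.getD o 0) 0
      max amount ans) 0

-- ===== PORT B =====
-- land[i][c] read of Source B (total form; Pre_ keeps every Python access in range)
def cellB (g : List (List Int)) (i j : Int) : Int :=
  PySem.List.pyGetD (PySem.List.pyGetD g i []) j 0

-- the four neighbour candidates ((x,y+1),(x,y-1),(x+1,y),(x-1,y))
def nbrsB (x y : Int) : List (Int × Int) := [(x, y + 1), (x, y - 1), (x + 1, y), (x - 1, y)]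

-- building `new` from one frontier
def growNewB (land : List (List Int)) (n m : Int)
    (filled : PySem.Set (Int × Int)) (frontier : List (Int × Int)) : PySem.Set (Int × Int) :=
  frontier.foldl (fun nw p =>
    (nbrsB p.1 p.2).foldl (fun nw q =>
      if 0 ≤ q.1 ∧ q.1 < n ∧ 0 ≤ q.2 ∧ q.2 < m ∧ cellB land q.1 q.2 ≠ 0 ∧ ¬ q ∈ filled
      then PySem.Set.add nw q else nw) nw) PySem.Set.empty

-- `while frontier:` of Source B (fuel only makes the loop total; it is never exhausted)
def growB (land : List (List Int)) (n m : Int) :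
    Nat → PySem.Set (Int × Int) → List (Int × Int) → PySem.Set (Int × Int)
  | 0, filled, _ => filled
  | fuel + 1, filled, frontier =>
    match frontier with
    | [] => filled
    | _ :: _ =>
      let nw := growNewB land n m filled frontier
      growB land n m fuel (PySem.Set.union filled nw) nw

def solution_alt (land : List (List Int)) : Int :=
  let n : Int := PySem.List.len land
  let m : Int := PySem.List.len ((PySem.List.pyGet? land 0).getD [])
  (PySem.List.pyRange 0 m 1).foldl (fun best c =>
    let seed : PySem.Set (Int × Int) := (PySem.List.pyRange 0 n 1).foldl
        (fun s i => if cellB land i c ≠ 0 then PySem.Set.add s (i, c) else s) PySem.Set.empty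
    let filled := growB land n m (n.toNat * m.toNat + 2) seed seed
    max best (PySem.Set.len filled)) 0

-- ===== PRECONDITION & SPEC =====
-- Pre_: the Python raises IndexError on an empty outer list (land[0]) and whenever some row is
-- shorter than row 0 (both programs read land[i][j] for every i < n, j < m); nothing on which A returns is excluded.
def Pre_solution (land : List (List Int)) : Prop :=
  land ≠ [] ∧ ∀ row ∈ land, land.headI.length ≤ row.length
instance (land : List (List Int)) : Decidable (Pre_solution land) := by
  unfold Pre_solution; infer_instance

def pvWitness_solution : List (List Int) := [[0]]

def Spec_solution (land : List (List Int)) (out : Int) : Prop := out = solution_alt land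
instance (land : List (List Int)) (out : Int) : Decidable (Spec_solution land out) := by
  unfold Spec_solution; infer_instance

-- ===== CLAIM (what is proved, stated in full; the proofs are below) =====
def Claim_equal_solution : Prop :=
  ∀ (land : List (List Int)), Dom_solution land → Pre_solution land →
    Spec_solution land (solution land)

-- ===== LEMMAS AND PROOFS =====

-- ---------- spec-side notions (proof helpers only) ----------

-- in-bounds oil cell
def pvOk (land : List (List Int)) (n m : Int) (p : Int × Int) : Prop :=
  0 ≤ p.1 ∧ p.1 < n ∧ 0 ≤ p.2 ∧ p.2 < m ∧ cellA land p.1 p.2 ≠ 0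

-- 4-neighbourhood adjacency between in-bounds oil cells
def pvAdj (land : List (List Int)) (n m : Int) (p q : Int × Int) : Prop :=
  pvOk land n m p ∧ pvOk land n m q ∧
    ((q.1 = p.1 ∧ (q.2 = p.2 + 1 ∨ q.2 = p.2 - 1)) ∨
     (q.2 = p.2 ∧ (q.1 = p.1 + 1 ∨ q.1 = p.1 - 1)))

-- connectivity inside the oil region
def pvReach (land : List (List Int)) (n m : Int) (s p : Int × Int) : Prop :=
  Relation.ReflTransGen (pvAdj land n m) s p

-- the label grid is an n.toNat × m.toNat rectangle
def pvShape (n m : Int) (g : List (List Int)) : Prop :=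
  g.length = n.toNat ∧ ∀ r ∈ g, r.length = m.toNat

-- row-major list of all in-bounds cells
def pvCells (n m : Int) : List (Int × Int) :=
  (PySem.List.pyRange 0 n 1).flatMap (fun i => (PySem.List.pyRange 0 m 1).map (fun j => (i, j)))

-- cells carrying label l
def pvClass (n m : Int) (g : List (List Int)) (l : Int) : List (Int × Int) :=
  (pvCells n m).filter (fun p => cellA g p.1 p.2 = l)

lemma pvCellB_eq : cellB = cellA := rfl

lemma pvAdj_symm (land : List (List Int)) (n m : Int) (p q : Int × Int)
    (h : pvAdj land n m p q) : pvAdj land n m q p := by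
  obtain ⟨hp, hq, ho⟩ := h
  exact ⟨hq, hp, by omega⟩

lemma pvReach_symm (land : List (List Int)) (n m : Int) (s p : Int × Int)
    (h : pvReach land n m s p) : pvReach land n m p s :=
  Relation.ReflTransGen.symmetric (fun _ _ hh => pvAdj_symm land n m _ _ hh) h

lemma pvReach_ok (land : List (List Int)) (n m : Int) (s p : Int × Int)
    (hs : pvOk land n m s) (h : pvReach land n m s p) : pvOk land n m p := by
  induction h with
  | refl => exact hs
  | tail _ ha _ => exact ha.2.1

-- adjacency targets are among the four neighbour candidates
lemma pvAdj_offsets (land : List (List Int)) (n m : Int) (p q : Int × Int)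
    (h : pvAdj land n m p q) : q ∈ nbrsB p.1 p.2 := by
  obtain ⟨-, -, ho⟩ := h
  simp only [nbrsB, List.mem_cons, List.not_mem_nil, or_false]
  rcases q with ⟨a, b⟩
  simp only [Prod.mk.injEq]
  omega

lemma pvAdj_of_offset (land : List (List Int)) (n m : Int) (p q : Int × Int)
    (hp : pvOk land n m p) (hq : pvOk land n m q) (h : q ∈ nbrsB p.1 p.2) :
    pvAdj land n m p q := by
  refine ⟨hp, hq, ?_⟩
  simp only [nbrsB, List.mem_cons, List.not_mem_nil, or_false] at h
  rcases q with ⟨a, b⟩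
  simp only [Prod.mk.injEq] at h
  omega

-- ---------- total-read grid lemmas ----------

lemma pvGetD_oob {a : Type} (xs : List a) (i : Int) (d : a) (h : (xs.length : Int) ≤ i) :
    PySem.List.pyGetD xs i d = d := by
  apply PySem.List.pyGetD_of_none
  rw [PySem.List.pyGet?_eq_none_iff]
  simp [PySem.Raise.InRange]
  omega

lemma pvGetD_in {a : Type} (xs : List a) (i : Int) (d : a) (h1 : 0 ≤ i)
    (h2 : i < (xs.length : Int)) : PySem.List.pyGetD xs i d = xs[i.toNat]'(by omega) :=
  PySem.List.pyGetD_eq_getElem _ _ h1 (by exact_mod_cast h2)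

lemma pvCell_set (n m : Int) (g : List (List Int)) (hsh : pvShape n m g) (i j v : Int)
    (hi : 0 ≤ i) (hi2 : i < (n.toNat : Int)) (hj : 0 ≤ j) (hj2 : j < (m.toNat : Int)) :
    pvShape n m (gsetA g i j v) ∧
      ∀ x y, 0 ≤ x → 0 ≤ y →
        cellA (gsetA g i j v) x y = if x = i ∧ y = j then v else cellA g x y := by
  have hilen : i < (g.length : Int) := by rw [hsh.1]; omega
  have hrowmem : g[i.toNat]'(by omega) ∈ g := List.getElem_mem _
  have hrowlen : (g[i.toNat]'(by omega)).length = m.toNat := hsh.2 _ hrowmem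
  have hrow : PySem.List.pyGetD g i ([] : List Int) = g[i.toNat]'(by omega) :=
    pvGetD_in g i [] hi hilen
  have hg' : gsetA g i j v =
      g.set i.toNat ((g[i.toNat]'(by omega)).set j.toNat v) := by
    unfold gsetA
    rw [hrow, PySem.List.pySetD_of_nonneg _ _ hi, PySem.List.pySetD_of_nonneg _ _ hj]
  constructor
  · rw [hg']
    refine ⟨by simp [hsh.1], ?_⟩
    intro r hr
    rcases List.mem_or_eq_of_mem_set hr with h | h
    · exact hsh.2 _ h
    · rw [h, List.length_set]; exact hrowlen
  · intro x y hx hy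
    rw [hg']
    by_cases hxi : x = i
    · subst hxi
      unfold cellA
      rw [pvGetD_in _ x _ hx (by simp; omega)]
      rw [List.getElem_set_self (by simp; omega)]
      by_cases hyj : y = j
      · subst hyj
        rw [pvGetD_in _ y _ hy (by simp [hrowlen]; omega)]
        rw [List.getElem_set_self (by rw [List.length_set, hrowlen]; omega)]
        simp
      · by_cases hylen : y < (m.toNat : Int)
        · rw [pvGetD_in _ y _ hy (by simp [hrowlen]; omega)]
          rw [List.getElem_set_ne (by omega)]
          have hsame : cellA g x y = (g[x.toNat]'(by omega))[y.toNat]'(by rw [hrowlen]; omega) := by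
            unfold cellA
            rw [hrow, pvGetD_in _ y _ hy (by rw [hrowlen]; omega)]
          rw [if_neg (by simp [hyj]), hrow, pvGetD_in _ y _ hy (by rw [hrowlen]; omega)]
        · rw [pvGetD_oob _ y 0 (by simp [hrowlen]; omega)]
          rw [if_neg (by simp [hyj])]
          rw [hrow, pvGetD_oob _ y 0 (by rw [hrowlen]; omega)]
    · by_cases hxlen : x < (g.length : Int)
      · unfold cellA
        rw [pvGetD_in _ x _ hx (by simp; omega), pvGetD_in g x _ hx hxlen]
        rw [List.getElem_set_ne (by omega)]
        simp [hxi]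
      · unfold cellA
        rw [pvGetD_oob _ x [] (by simp; omega), pvGetD_oob g x [] (by omega)]
        simp [hxi]

lemma pvMem_cells (n m : Int) (p : Int × Int) :
    p ∈ pvCells n m ↔ 0 ≤ p.1 ∧ p.1 < n ∧ 0 ≤ p.2 ∧ p.2 < m := by
  rcases p with ⟨a, b⟩
  simp only [pvCells, List.mem_flatMap, List.mem_map, PySem.List.mem_pyRange_one,
    Prod.mk.injEq]
  constructor
  · rintro ⟨i, hi, j, hj, h1, h2⟩
    subst h1; subst h2
    exact ⟨hi.1, hi.2, hj.1, hj.2⟩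
  · rintro ⟨h1, h2, h3, h4⟩
    exact ⟨a, ⟨h1, h2⟩, b, ⟨h3, h4⟩, rfl, rfl⟩

lemma pvNodup_cells (n m : Int) : (pvCells n m).Nodup := by
  unfold pvCells
  rw [List.flatMap_def, List.nodup_flatten]
  constructor
  · intro xs hxs
    simp only [List.mem_map] at hxs
    obtain ⟨i, -, rfl⟩ := hxs
    exact (PySem.List.nodup_pyRange_one 0 m).map (fun a b h => congrArg Prod.snd h)
  · rw [List.pairwise_map]
    refine List.Pairwise.imp ?_ (PySem.List.nodup_pyRange_one 0 n)
    intro i1 i2 hne x hx1 hx2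
    simp only [List.mem_map] at hx1 hx2
    obtain ⟨j1, -, rfl⟩ := hx1
    obtain ⟨j2, -, h⟩ := hx2
    exact hne (congrArg Prod.fst h).symm

lemma pvLength_cells (n m : Int) : (pvCells n m).length = n.toNat * m.toNat := by
  have key : ∀ (l : List Int), (l.map (fun _ : Int => m.toNat)).sum = l.length * m.toNat := by
    intro l
    induction l with
    | nil => simp
    | cons a t ih => simp [Nat.succ_mul, Nat.add_comm]
  unfold pvCells
  rw [List.length_flatMap]
  have h1 : ((PySem.List.pyRange 0 n 1).map
        fun i => ((PySem.List.pyRange 0 m 1).map (fun j => (i, j))).length)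
      = ((PySem.List.pyRange 0 n 1).map fun _ => m.toNat) := by
    apply List.map_congr_left
    intro i _
    rw [List.length_map, PySem.List.length_pyRange_one]
    simp
  rw [h1, key, PySem.List.length_pyRange_one]
  simp

lemma pvOk_card (land : List (List Int)) (n m : Int) (l : List (Int × Int))
    (hnd : l.Nodup) (h : ∀ p ∈ l, pvOk land n m p) : l.length ≤ n.toNat * m.toNat := by
  have hsub : l ⊆ pvCells n m := by
    intro p hp
    obtain ⟨h1, h2, h3, h4, -⟩ := h p hp
    exact (pvMem_cells n m p).2 ⟨h1, h2, h3, h4⟩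
  have := (List.subperm_of_subset hnd hsub).length_le
  rwa [pvLength_cells] at this

lemma pvLen_eq (l1 l2 : List (Int × Int)) (h1 : l1.Nodup) (h2 : l2.Nodup)
    (h : ∀ x, x ∈ l1 ↔ x ∈ l2) : l1.length = l2.length :=
  ((List.perm_ext_iff_of_nodup h1 h2).2 h).length_eq

lemma pvFoldAdd {α : Type} (f : α → Int × Int) (C : α → Prop) [DecidablePred C] :
    ∀ (l : List α) (acc : PySem.Set (Int × Int)), acc.Nodup →
      (l.foldl (fun s a => if C a then PySem.Set.add s (f a) else s) acc).Nodup ∧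
      ∀ x, x ∈ l.foldl (fun s a => if C a then PySem.Set.add s (f a) else s) acc ↔
        x ∈ acc ∨ ∃ a ∈ l, C a ∧ x = f a := by
  intro l
  induction l with
  | nil => intro acc hacc; simpa using hacc
  | cons a t ih =>
    intro acc hacc
    simp only [List.foldl_cons]
    by_cases hC : C a
    · rw [if_pos hC]
      obtain ⟨hnd, hmem⟩ := ih (PySem.Set.add acc (f a)) (PySem.Set.nodup_add _ _ hacc)
      refine ⟨hnd, fun x => ?_⟩
      rw [hmem x, PySem.Set.mem_add]
      constructor
      · rintro ((h | h) | ⟨b, hb, hCb, rfl⟩)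
        · exact Or.inl h
        · exact Or.inr ⟨a, by simp, hC, h.symm ▸ rfl⟩
        · exact Or.inr ⟨b, by simp [hb], hCb, rfl⟩
      · rintro (h | ⟨b, hb, hCb, rfl⟩)
        · exact Or.inl (Or.inl h)
        · rcases List.mem_cons.1 hb with rfl | hb
          · exact Or.inl (Or.inr rfl)
          · exact Or.inr ⟨b, hb, hCb, rfl⟩
    · rw [if_neg hC]
      obtain ⟨hnd, hmem⟩ := ih acc hacc
      refine ⟨hnd, fun x => ?_⟩
      rw [hmem x]
      constructor
      · rintro (h | ⟨b, hb, hCb, rfl⟩)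
        · exact Or.inl h
        · exact Or.inr ⟨b, by simp [hb], hCb, rfl⟩
      · rintro (h | ⟨b, hb, hCb, rfl⟩)
        · exact Or.inl h
        · rcases List.mem_cons.1 hb with rfl | hb
          · exact absurd hCb hC
          · exact Or.inr ⟨b, hb, hCb, rfl⟩

-- ---------- port B machinery ----------

lemma pvGrowNew_spec (land : List (List Int)) (n m : Int) (filled : PySem.Set (Int × Int))
    (fr : List (Int × Int)) :
    (growNewB land n m filled fr).Nodup ∧
    ∀ x, x ∈ growNewB land n m filled fr ↔
      (∃ p ∈ fr, x ∈ nbrsB p.1 p.2) ∧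
        (0 ≤ x.1 ∧ x.1 < n ∧ 0 ≤ x.2 ∧ x.2 < m ∧ cellA land x.1 x.2 ≠ 0 ∧ x ∉ filled) := by
  have main : ∀ (fr : List (Int × Int)) (acc : PySem.Set (Int × Int)), acc.Nodup →
      (fr.foldl (fun nw p => (nbrsB p.1 p.2).foldl (fun nw q =>
          if 0 ≤ q.1 ∧ q.1 < n ∧ 0 ≤ q.2 ∧ q.2 < m ∧ cellB land q.1 q.2 ≠ 0 ∧ ¬ q ∈ filled
          then PySem.Set.add nw q else nw) nw) acc).Nodup ∧
      ∀ x, x ∈ fr.foldl (fun nw p => (nbrsB p.1 p.2).foldl (fun nw q =>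
          if 0 ≤ q.1 ∧ q.1 < n ∧ 0 ≤ q.2 ∧ q.2 < m ∧ cellB land q.1 q.2 ≠ 0 ∧ ¬ q ∈ filled
          then PySem.Set.add nw q else nw) nw) acc ↔
        x ∈ acc ∨ ((∃ p ∈ fr, x ∈ nbrsB p.1 p.2) ∧
          (0 ≤ x.1 ∧ x.1 < n ∧ 0 ≤ x.2 ∧ x.2 < m ∧ cellB land x.1 x.2 ≠ 0 ∧ x ∉ filled)) := by
    intro fr
    induction fr with
    | nil => intro acc hacc; simpa using hacc
    | cons p t ih =>
      intro acc hacc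
      simp only [List.foldl_cons]
      obtain ⟨hnd1, hmem1⟩ := pvFoldAdd (fun q : Int × Int => q)
        (fun q : Int × Int => 0 ≤ q.1 ∧ q.1 < n ∧ 0 ≤ q.2 ∧ q.2 < m ∧ cellB land q.1 q.2 ≠ 0 ∧ ¬ q ∈ filled)
        (nbrsB p.1 p.2) acc hacc
      obtain ⟨hnd2, hmem2⟩ := ih _ hnd1
      refine ⟨hnd2, fun x => ?_⟩
      rw [hmem2 x, hmem1 x]
      constructor
      · rintro ((h | ⟨a, ha, hC, rfl⟩) | ⟨⟨p', hp', hn'⟩, hC⟩)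
        · exact Or.inl h
        · exact Or.inr ⟨⟨p, by simp, ha⟩, hC⟩
        · exact Or.inr ⟨⟨p', by simp [hp'], hn'⟩, hC⟩
      · rintro (h | ⟨⟨p', hp', hn'⟩, hC⟩)
        · exact Or.inl (Or.inl h)
        · rcases List.mem_cons.1 hp' with rfl | hp'
          · exact Or.inl (Or.inr ⟨x, hn', hC, rfl⟩)
          · exact Or.inr ⟨⟨p', hp', hn'⟩, hC⟩
  obtain ⟨hnd, hmem⟩ := main fr PySem.Set.empty (by simp [PySem.Set.empty])
  refine ⟨hnd, fun x => ?_⟩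
  unfold growNewB
  rw [hmem x]
  rw [pvCellB_eq]
  simp [PySem.Set.empty]

structure PvInvB (land : List (List Int)) (n m : Int) (S0 filled frontier : List (Int × Int)) : Prop where
  nd : filled.Nodup
  fsub : ∀ p ∈ frontier, p ∈ filled
  s0sub : ∀ p ∈ S0, p ∈ filled
  okAll : ∀ p ∈ filled, pvOk land n m p
  reachAll : ∀ p ∈ filled, ∃ s ∈ S0, pvReach land n m s p
  closed : ∀ p ∈ filled, p ∉ frontier → ∀ q, pvAdj land n m p q → q ∈ filled

lemma pvGrowB_run (land : List (List Int)) (n m : Int) (S0 : List (Int × Int)) :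
    ∀ (fuel : Nat) (filled frontier : List (Int × Int)),
      PvInvB land n m S0 filled frontier →
      (frontier = [] → 1 ≤ fuel) →
      (frontier ≠ [] → n.toNat * m.toNat + 2 ≤ fuel + filled.length) →
      (growB land n m fuel filled frontier).Nodup ∧
        ∀ p, p ∈ growB land n m fuel filled frontier ↔ ∃ s ∈ S0, pvReach land n m s p := by
  intro fuel
  induction fuel with
  | zero =>
    intro filled frontier inv h1 h2
    rcases List.eq_nil_or_concat frontier with rfl | _
    · exact absurd (h1 rfl) (by omega)
    · have hlen := pvOk_card land n m filled inv.nd inv.okAll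
      have := h2 (by rintro rfl; simp_all)
      omega
  | succ fuel ih =>
    intro filled frontier inv h1 h2
    match frontier with
    | [] =>
      show (growB land n m (fuel + 1) filled []).Nodup ∧ _
      rw [show growB land n m (fuel + 1) filled [] = filled from rfl]
      refine ⟨inv.nd, fun p => ⟨fun hp => inv.reachAll p hp, ?_⟩⟩
      rintro ⟨s, hs, hreach⟩
      induction hreach with
      | refl => exact inv.s0sub s hs
      | tail hr hadj ihr =>
        exact inv.closed _ ihr (by simp) _ hadj
    | f :: t =>
      obtain ⟨hnwnd, hnwmem⟩ := pvGrowNew_spec land n m filled (f :: t)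
      set nw := growNewB land n m filled (f :: t) with hnw
      have hdisj : ∀ x ∈ nw, x ∉ filled := fun x hx => ((hnwmem x).1 hx).2.2.2.2.2.2
      have hu : PySem.Set.union filled nw = filled ++ nw := by
        show PySem.Set.update filled nw = filled ++ nw
        exact PySem.Set.update_eq_append_of_disjoint _ _ hnwnd hdisj
      have hstep : growB land n m (fuel + 1) filled (f :: t) =
          growB land n m fuel (PySem.Set.union filled nw) nw := rfl
      have hNewOk : ∀ x ∈ nw, pvOk land n m x := by
        intro x hx
        obtain ⟨-, h1', h2', h3', h4', h5', -⟩ := (hnwmem x).1 hx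
        exact ⟨h1', h2', h3', h4', h5'⟩
      have hNewReach : ∀ x ∈ nw, ∃ s ∈ S0, pvReach land n m s x := by
        intro x hx
        obtain ⟨⟨p, hp, hn'⟩, hC⟩ := (hnwmem x).1 hx
        obtain ⟨s, hs, hr⟩ := inv.reachAll p (inv.fsub p hp)
        exact ⟨s, hs, hr.tail (pvAdj_of_offset land n m p x
          (inv.okAll p (inv.fsub p hp)) (hNewOk x hx) hn')⟩
      have inv' : PvInvB land n m S0 (PySem.Set.union filled nw) nw := by
        rw [hu]
        refine ⟨inv.nd.append hnwnd (fun x hx1 hx2 => hdisj x hx2 hx1), ?_, ?_, ?_, ?_, ?_⟩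
        · intro p hp; exact List.mem_append_right _ hp
        · intro p hp; exact List.mem_append_left _ (inv.s0sub p hp)
        · intro p hp
          rcases List.mem_append.1 hp with hp | hp
          · exact inv.okAll p hp
          · exact hNewOk p hp
        · intro p hp
          rcases List.mem_append.1 hp with hp | hp
          · exact inv.reachAll p hp
          · exact hNewReach p hp
        · intro p hp hnfr q hadj
          rcases List.mem_append.1 hp with hp | hp
          · by_cases hfr : p ∈ f :: t
            · by_cases hqf : q ∈ filled
              · exact List.mem_append_left _ hqf
              · refine List.mem_append_right _ ((hnwmem q).2 ⟨⟨p, hfr, pvAdj_offsets land n m p q hadj⟩, ?_⟩)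
                obtain ⟨h1', h2', h3', h4', h5'⟩ := hadj.2.1
                exact ⟨h1', h2', h3', h4', h5', hqf⟩
            · exact List.mem_append_left _ (inv.closed p hp hfr q hadj)
          · exact absurd hp hnfr
      rw [hstep]
      rcases List.eq_nil_or_concat nw with hnil | ⟨_, _, hcons⟩
      · apply ih _ _ inv'
        · intro _
          have hlen := pvOk_card land n m filled inv.nd inv.okAll
          have := h2 (by simp)
          omega
        · intro hne; rw [hnil] at hne; simp at hne
      · apply ih _ _ inv'
        · intro hnil'; rw [hnil'] at hcons; simp at hcons
        · intro _
          have hlen : (PySem.Set.union filled nw).length = filled.length + nw.length := by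
            rw [hu, List.length_append]
          have hnwpos : 1 ≤ nw.length := by
            rw [hcons]; simp
          have := h2 (by simp)
          omega

-- ---------- port A BFS machinery ----------

lemma pvNbrs_dirs (x y : Int) (q : Int × Int) (h : q ∈ nbrsB x y) :
    ∃ d ∈ [((0:Int), (1:Int)), (0, -1), (1, 0), (-1, 0)], q = (x + d.1, y + d.2) := by
  simp only [nbrsB, List.mem_cons, List.not_mem_nil, or_false] at h
  rcases h with rfl | rfl | rfl | rfl
  · exact ⟨(0, 1), by simp, by simp⟩
  · exact ⟨(0, -1), by simp, by simp [Prod.ext_iff]; omega⟩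
  · exact ⟨(1, 0), by simp, by simp⟩
  · exact ⟨(-1, 0), by simp, by simp [Prod.ext_iff]; omega⟩

lemma pvDirs_nbrs (x y : Int) (d : Int × Int)
    (hd : d ∈ [((0:Int), (1:Int)), (0, -1), (1, 0), (-1, 0)]) :
    (x + d.1, y + d.2) ∈ nbrsB x y := by
  simp only [List.mem_cons, List.not_mem_nil, or_false] at hd
  rcases hd with rfl | rfl | rfl | rfl <;> simp [nbrsB, Prod.ext_iff] <;> omega

lemma pvStepA (land : List (List Int)) (n m area : Int) (seed : Int × Int)
    (g0 : List (List Int)) (x y : Int) (d : Int × Int)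
    (hn : 0 ≤ n) (hm : 0 ≤ m) (harea : area ≠ 0)
    (hd : d ∈ [((0:Int), (1:Int)), (0, -1), (1, 0), (-1, 0)])
    (g : List (List Int)) (qa : List (Int × Int)) (cnt : Int) (seen : List (Int × Int))
    (hsh : pvShape n m g) (hnd : seen.Nodup)
    (hok : ∀ p ∈ seen, pvOk land n m p)
    (hreach : ∀ p ∈ seen, pvReach land n m seed p)
    (hlab : ∀ x' y', 0 ≤ x' → 0 ≤ y' →
      cellA g x' y' = if (x', y') ∈ seen then area else cellA g0 x' y')
    (hxy : (x, y) ∈ seen) :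
    ∃ ext g',
      bfsStepA land n m area x y (g, qa, cnt) d = (g', qa ++ ext, cnt + (ext.length : Int)) ∧
      pvShape n m g' ∧ (seen ++ ext).Nodup ∧
      (∀ p ∈ ext, pvOk land n m p ∧ pvReach land n m seed p) ∧
      (∀ x' y', 0 ≤ x' → 0 ≤ y' →
        cellA g' x' y' = if (x', y') ∈ seen ++ ext then area else cellA g0 x' y') ∧
      (pvOk land n m (x + d.1, y + d.2) →
        ((x + d.1, y + d.2) ∈ seen ++ ext ∨ cellA g0 (x + d.1) (y + d.2) ≠ 0)) := by
  unfold bfsStepA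
  simp only []
  split_ifs with h1 h2 h3
  · refine ⟨[], g, by simp, hsh, by simpa using hnd, by simp, ?_, ?_⟩
    · simpa using hlab
    · intro hOk
      obtain ⟨a1, a2, a3, a4, -⟩ := hOk
      simp only at a1 a2 a3 a4
      omega
  · refine ⟨[], g, by simp, hsh, by simpa using hnd, by simp, ?_, ?_⟩
    · simpa using hlab
    · intro hOk
      exact absurd h2 hOk.2.2.2.2
  · have hb1 : 0 ≤ x + d.1 := by omega
    have hb2 : 0 ≤ y + d.2 := by omega
    refine ⟨[], g, by simp, hsh, by simpa using hnd, by simp, ?_, ?_⟩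
    · simpa using hlab
    · intro hOk
      have := hlab (x + d.1) (y + d.2) hb1 hb2
      rw [this] at h3
      by_cases hmem : (x + d.1, y + d.2) ∈ seen
      · exact Or.inl (by simpa using hmem)
      · rw [if_neg hmem] at h3
        exact Or.inr h3
  · -- the neighbour is added
    have hb1 : 0 ≤ x + d.1 := by omega
    have hb2 : 0 ≤ y + d.2 := by omega
    have hzero : cellA g (x + d.1) (y + d.2) = 0 := by
      by_contra hc
      exact h3 hc
    have hnotseen : (x + d.1, y + d.2) ∉ seen := by
      intro hmem
      rw [hlab _ _ hb1 hb2, if_pos hmem] at hzero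
      exact harea hzero
    have hg0 : cellA g0 (x + d.1) (y + d.2) = 0 := by
      rw [hlab _ _ hb1 hb2, if_neg hnotseen] at hzero
      exact hzero
    have hOk' : pvOk land n m (x + d.1, y + d.2) := by
      refine ⟨hb1, by omega, hb2, by omega, ?_⟩
      simpa using h2
    obtain ⟨hsh', hcell'⟩ := pvCell_set n m g hsh (x + d.1) (y + d.2) area hb1
      (by obtain ⟨-, a2, -, -, -⟩ := hOk'; simp only at a2 ⊢; omega)
      hb2 (by obtain ⟨-, -, -, a4, -⟩ := hOk'; simp only at a4 ⊢; omega)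
    refine ⟨[(x + d.1, y + d.2)], gsetA g (x + d.1) (y + d.2) area, by simp, hsh', ?_, ?_, ?_, ?_⟩
    · refine List.Nodup.append hnd (by simp) ?_
      intro a ha hb
      rw [List.mem_singleton] at hb
      subst hb
      exact hnotseen ha
    · intro p hp
      rcases List.mem_singleton.1 hp with rfl
      exact ⟨hOk', (hreach _ hxy).tail
        (pvAdj_of_offset land n m (x, y) _ (hok _ hxy) hOk' (pvDirs_nbrs x y d hd))⟩
    · intro x' y' hx' hy'
      rw [hcell' x' y' hx' hy']
      by_cases hc : x' = x + d.1 ∧ y' = y + d.2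
      · obtain ⟨rfl, rfl⟩ := hc
        simp
      · rw [if_neg hc, hlab x' y' hx' hy']
        have : ((x', y') ∈ seen ++ [(x + d.1, y + d.2)]) ↔ (x', y') ∈ seen := by
          simp only [List.mem_append, List.mem_singleton]
          constructor
          · rintro (h | h)
            · exact h
            · exact absurd (by exact ⟨congrArg Prod.fst h, congrArg Prod.snd h⟩) hc
          · exact Or.inl
        rw [if_congr this rfl rfl]
    · intro _
      exact Or.inl (by simp)

lemma pvFoldDirsA (land : List (List Int)) (n m area : Int) (seed : Int × Int)
    (g0 : List (List Int)) (x y : Int)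
    (hn : 0 ≤ n) (hm : 0 ≤ m) (harea : area ≠ 0) :
    ∀ (ds : List (Int × Int)),
      (∀ d ∈ ds, d ∈ [((0:Int), (1:Int)), (0, -1), (1, 0), (-1, 0)]) →
      ∀ (g : List (List Int)) (qa : List (Int × Int)) (cnt : Int) (seen : List (Int × Int)),
        pvShape n m g → seen.Nodup →
        (∀ p ∈ seen, pvOk land n m p) →
        (∀ p ∈ seen, pvReach land n m seed p) →
        (∀ x' y', 0 ≤ x' → 0 ≤ y' →
          cellA g x' y' = if (x', y') ∈ seen then area else cellA g0 x' y') →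
        (x, y) ∈ seen →
        ∃ ext g',
          ds.foldl (bfsStepA land n m area x y) (g, qa, cnt) =
            (g', qa ++ ext, cnt + (ext.length : Int)) ∧
          pvShape n m g' ∧ (seen ++ ext).Nodup ∧
          (∀ p ∈ ext, pvOk land n m p ∧ pvReach land n m seed p) ∧
          (∀ x' y', 0 ≤ x' → 0 ≤ y' →
            cellA g' x' y' = if (x', y') ∈ seen ++ ext then area else cellA g0 x' y') ∧
          (∀ d ∈ ds, pvOk land n m (x + d.1, y + d.2) →
            ((x + d.1, y + d.2) ∈ seen ++ ext ∨ cellA g0 (x + d.1) (y + d.2) ≠ 0)) := by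
  intro ds
  induction ds with
  | nil =>
    intro _ g qa cnt seen hsh hnd hok hreach hlab hxy
    exact ⟨[], g, by simp, hsh, by simpa using hnd, by simp, by simpa using hlab, by simp⟩
  | cons d ds ih =>
    intro hds g qa cnt seen hsh hnd hok hreach hlab hxy
    obtain ⟨e1, g1, heq1, hsh1, hnd1, hprops1, hlab1, hcov1⟩ :=
      pvStepA land n m area seed g0 x y d hn hm harea (hds d (by simp))
        g qa cnt seen hsh hnd hok hreach hlab hxy
    have hok1 : ∀ p ∈ seen ++ e1, pvOk land n m p := by
      intro p hp
      rcases List.mem_append.1 hp with hp | hp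
      · exact hok p hp
      · exact (hprops1 p hp).1
    have hreach1 : ∀ p ∈ seen ++ e1, pvReach land n m seed p := by
      intro p hp
      rcases List.mem_append.1 hp with hp | hp
      · exact hreach p hp
      · exact (hprops1 p hp).2
    obtain ⟨e2, g2, heq2, hsh2, hnd2, hprops2, hlab2, hcov2⟩ :=
      ih (fun d' hd' => hds d' (by simp [hd'])) g1 (qa ++ e1) (cnt + (e1.length : Int))
        (seen ++ e1) hsh1 hnd1 hok1 hreach1 hlab1 (List.mem_append_left _ hxy)
    refine ⟨e1 ++ e2, g2, ?_, hsh2, ?_, ?_, ?_, ?_⟩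
    · rw [List.foldl_cons, heq1, heq2]
      simp only [List.append_assoc, List.length_append, Prod.mk.injEq]
      refine ⟨trivial, trivial, ?_⟩
      push_cast
      omega
    · rwa [← List.append_assoc]
    · intro p hp
      rcases List.mem_append.1 hp with hp | hp
      · exact hprops1 p hp
      · exact hprops2 p (by simp [hp])
    · intro x' y' hx' hy'
      rw [hlab2 x' y' hx' hy', List.append_assoc]
    · intro d' hd' hOk'
      rcases List.mem_cons.1 hd' with rfl | hd'
      · rcases hcov1 hOk' with h | h
        · refine Or.inl ?_
          rcases List.mem_append.1 h with h' | h'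
          · exact List.mem_append_left _ h'
          · exact List.mem_append_right _ (List.mem_append_left _ h')
        · exact Or.inr h
      · rcases hcov2 d' hd' hOk' with h | h
        · exact Or.inl (by rwa [← List.append_assoc])
        · exact Or.inr h

structure PvInvA (land : List (List Int)) (n m area : Int) (seed : Int × Int)
    (g0 g : List (List Int)) (q seen : List (Int × Int)) (cnt : Int) : Prop where
  shape : pvShape n m g
  nd : seen.Nodup
  seedMem : seed ∈ seen
  qsub : ∀ p ∈ q, p ∈ seen
  okAll : ∀ p ∈ seen, pvOk land n m p
  reachAll : ∀ p ∈ seen, pvReach land n m seed p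
  lab : ∀ x y, 0 ≤ x → 0 ≤ y →
    cellA g x y = if (x, y) ∈ seen then area else cellA g0 x y
  closed : ∀ p ∈ seen, p ∉ q → ∀ q', pvAdj land n m p q' →
    q' ∈ seen ∨ cellA g0 q'.1 q'.2 ≠ 0
  cntEq : cnt = (seen.length : Int)

lemma pvBfsA_run (land : List (List Int)) (n m area : Int) (seed : Int × Int)
    (g0 : List (List Int)) (hn : 0 ≤ n) (hm : 0 ≤ m) (harea : area ≠ 0)
    (hfresh : ∀ p, pvReach land n m seed p → cellA g0 p.1 p.2 = 0) :
    ∀ (fuel : Nat) (g : List (List Int)) (q seen : List (Int × Int)) (cnt : Int),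
      PvInvA land n m area seed g0 g q seen cnt →
      n.toNat * m.toNat + q.length + 1 ≤ fuel + seen.length →
      ∃ seenF : List (Int × Int), seenF.Nodup ∧
        (∀ p, p ∈ seenF ↔ pvReach land n m seed p) ∧
        (bfsA land n m area fuel g q cnt).2 = (seenF.length : Int) ∧
        pvShape n m (bfsA land n m area fuel g q cnt).1 ∧
        (∀ x y, 0 ≤ x → 0 ≤ y → cellA (bfsA land n m area fuel g q cnt).1 x y =
          if (x, y) ∈ seenF then area else cellA g0 x y) := by
  intro fuel
  induction fuel with
  | zero =>
    intro g q seen cnt inv hfuel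
    have := pvOk_card land n m seen inv.nd inv.okAll
    omega
  | succ fuel ih =>
    intro g q seen cnt inv hfuel
    match q with
    | [] =>
      refine ⟨seen, inv.nd, ?_, inv.cntEq.symm ▸ rfl, inv.shape, inv.lab⟩
      intro p
      refine ⟨fun hp => inv.reachAll p hp, fun hreach => ?_⟩
      induction hreach with
      | refl => exact inv.seedMem
      | tail hr hadj ihr =>
        rcases inv.closed _ ihr (by simp) _ hadj with h | h
        · exact h
        · exact absurd (hfresh _ (hr.tail hadj)) h
    | (x, y) :: rest =>
      obtain ⟨ext, g1, heq, hsh1, hnd1, hprops, hlab1, hcov⟩ :=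
        pvFoldDirsA land n m area seed g0 x y hn hm harea
          [((0:Int), (1:Int)), (0, -1), (1, 0), (-1, 0)] (fun d hd => hd)
          g rest cnt seen inv.shape inv.nd inv.okAll inv.reachAll inv.lab
          (inv.qsub _ (by simp))
      have hstep : bfsA land n m area (fuel + 1) g ((x, y) :: rest) cnt =
          bfsA land n m area fuel g1 (rest ++ ext) (cnt + (ext.length : Int)) := by
        show bfsA land n m area fuel
          ([((0:Int), (1:Int)), (0, -1), (1, 0), (-1, 0)].foldl
            (bfsStepA land n m area x y) (g, rest, cnt)).1 _ _ = _
        rw [heq]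
      rw [hstep]
      have inv' : PvInvA land n m area seed g0 g1 (rest ++ ext) (seen ++ ext)
          (cnt + (ext.length : Int)) := by
        refine ⟨hsh1, hnd1, List.mem_append_left _ inv.seedMem, ?_, ?_, ?_, hlab1, ?_, ?_⟩
        · intro p hp
          rcases List.mem_append.1 hp with hp | hp
          · exact List.mem_append_left _ (inv.qsub p (by simp [hp]))
          · exact List.mem_append_right _ hp
        · intro p hp
          rcases List.mem_append.1 hp with hp | hp
          · exact inv.okAll p hp
          · exact (hprops p hp).1
        · intro p hp
          rcases List.mem_append.1 hp with hp | hp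
          · exact inv.reachAll p hp
          · exact (hprops p hp).2
        · intro p hp hpq q' hadj
          rcases List.mem_append.1 hp with hp | hp
          · by_cases hpxy : p = (x, y)
            · subst hpxy
              obtain ⟨d, hd, rfl⟩ := pvNbrs_dirs x y q' (pvAdj_offsets land n m _ _ hadj)
              exact hcov d hd hadj.2.1
            · have : p ∉ (x, y) :: rest := by
                simp only [List.mem_cons]
                rintro (rfl | hrest)
                · exact hpxy rfl
                · exact hpq (List.mem_append_left _ hrest)
              rcases inv.closed p hp this q' hadj with h | h
              · exact Or.inl (List.mem_append_left _ h)
              · exact Or.inr h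
          · exact absurd (List.mem_append_right _ hp) hpq
        · rw [inv.cntEq, List.length_append]
          push_cast
          ring
      apply ih g1 (rest ++ ext) (seen ++ ext) (cnt + (ext.length : Int)) inv'
      simp only [List.length_append]
      simp only [List.length_cons] at hfuel
      omega

-- ---------- phase 1: the labeling scan ----------

structure PvInv1 (land : List (List Int)) (n m : Int)
    (st : List (List Int) × PySem.Dict Int Int × Int) : Prop where
  shape : pvShape n m st.1
  area1 : 1 ≤ st.2.2
  labOk : ∀ x y, 0 ≤ x → 0 ≤ y → cellA st.1 x y ≠ 0 → pvOk land n m (x, y)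
  labLt : ∀ x y, 0 ≤ x → 0 ≤ y → cellA st.1 x y ≠ 0 →
    1 ≤ cellA st.1 x y ∧ cellA st.1 x y < st.2.2
  comp : ∀ l, 1 ≤ l → l < st.2.2 → ∃ s, pvOk land n m s ∧
    ∀ x y, 0 ≤ x → 0 ≤ y → (cellA st.1 x y = l ↔ pvReach land n m s (x, y))
  cnts : ∀ l, 1 ≤ l → l < st.2.2 →
    st.2.1.getD l 0 = ((pvClass n m st.1 l).length : Int)

lemma pvScan_step (land : List (List Int)) (n m : Int) (hn : 0 ≤ n) (hm : 0 ≤ m)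
    (st : List (List Int) × PySem.Dict Int Int × Int) (c : Int × Int)
    (hc : 0 ≤ c.1 ∧ c.1 < n ∧ 0 ≤ c.2 ∧ c.2 < m)
    (inv : PvInv1 land n m st) :
    PvInv1 land n m (scanCellA land n m st c) ∧
    (∀ x y, 0 ≤ x → 0 ≤ y → cellA st.1 x y ≠ 0 →
      cellA (scanCellA land n m st c).1 x y = cellA st.1 x y) ∧
    (cellA land c.1 c.2 ≠ 0 → cellA (scanCellA land n m st c).1 c.1 c.2 ≠ 0) := by
  unfold scanCellA
  split_ifs with h1 h2
  · exact ⟨inv, fun x y _ _ _ => rfl, fun h => absurd h1 h⟩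
  · exact ⟨inv, fun x y _ _ _ => rfl, fun _ => h2⟩
  · -- a fresh seed: run the BFS
    have h2' : cellA st.1 c.1 c.2 = 0 := by
      by_contra hc'
      exact h2 hc'
    have hOkc : pvOk land n m c := ⟨hc.1, hc.2.1, hc.2.2.1, hc.2.2.2, h1⟩
    have harea : st.2.2 ≠ 0 := by have := inv.area1; omega
    have hfresh : ∀ p, pvReach land n m c p → cellA st.1 p.1 p.2 = 0 := by
      intro p hr
      by_contra hne
      obtain ⟨hp1, -, hp3, -, -⟩ := pvReach_ok land n m c p hOkc hr
      obtain ⟨hl1, hl2⟩ := inv.labLt p.1 p.2 hp1 hp3 hne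
      obtain ⟨s, hsok, hs⟩ := inv.comp (cellA st.1 p.1 p.2) hl1 hl2
      have hsp : pvReach land n m s p := (hs p.1 p.2 hp1 hp3).1 rfl
      have hsc : pvReach land n m s c := hsp.trans (pvReach_symm land n m c p hr)
      have : cellA st.1 c.1 c.2 = cellA st.1 p.1 p.2 := (hs c.1 c.2 hc.1 hc.2.2.1).2 hsc
      rw [h2'] at this
      omega
    obtain ⟨hshseed, hcellseed⟩ := pvCell_set n m st.1 inv.shape c.1 c.2 st.2.2
      hc.1 (by omega) hc.2.2.1 (by omega)
    have inv0 : PvInvA land n m st.2.2 c st.1 (gsetA st.1 c.1 c.2 st.2.2) [c] [c] 1 := by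
      refine ⟨hshseed, by simp, by simp, by simp, ?_, ?_, ?_, ?_, by simp⟩
      · intro p hp
        rw [List.mem_singleton] at hp
        subst hp
        exact hOkc
      · intro p hp
        rw [List.mem_singleton] at hp
        subst hp
        exact Relation.ReflTransGen.refl
      · intro x y hx hy
        rw [hcellseed x y hx hy]
        have : ((x, y) ∈ [c]) ↔ (x = c.1 ∧ y = c.2) := by
          rw [List.mem_singleton, Prod.ext_iff]
        rw [if_congr this.symm rfl rfl]
      · intro p hp hnp
        exact absurd hp hnp
    obtain ⟨seenF, hFnd, hFmem, hcnt, hshF, hlabF⟩ :=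
      pvBfsA_run land n m st.2.2 c st.1 hn hm harea hfresh
        (n.toNat * m.toNat + 1) (gsetA st.1 c.1 c.2 st.2.2) [c] [c] 1 inv0 (by simp)
    set r := bfsA land n m st.2.2 (n.toNat * m.toNat + 1) (gsetA st.1 c.1 c.2 st.2.2) [c] 1 with hr
    have hcompA : ∀ x y, 0 ≤ x → 0 ≤ y →
        (cellA r.1 x y = st.2.2 ↔ pvReach land n m c (x, y)) := by
      intro x y hx hy
      rw [hlabF x y hx hy]
      by_cases hmem : (x, y) ∈ seenF
      · rw [if_pos hmem]
        exact ⟨fun _ => (hFmem _).1 hmem, fun _ => rfl⟩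
      · simp only [if_neg hmem]
        constructor
        · intro hke
          by_cases hz : cellA st.1 x y = 0
          · rw [hz] at hke; exact absurd hke.symm harea
          · have := (inv.labLt x y hx hy hz).2
            omega
        · intro hre
          exact absurd ((hFmem _).2 hre) hmem
    have hmono : ∀ x y, 0 ≤ x → 0 ≤ y → cellA st.1 x y ≠ 0 →
        cellA r.1 x y = cellA st.1 x y := by
      intro x y hx hy hne
      rw [hlabF x y hx hy]
      by_cases hmem : (x, y) ∈ seenF
      · exact absurd (hfresh (x, y) ((hFmem _).1 hmem)) hne
      · rw [if_neg hmem]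
    refine ⟨?_, hmono, ?_⟩
    · refine ⟨hshF, by have := inv.area1; simp only; omega, ?_, ?_, ?_, ?_⟩
      · intro x y hx hy hne
        rw [hlabF x y hx hy] at hne
        by_cases hmem : (x, y) ∈ seenF
        · exact pvReach_ok land n m c (x, y) hOkc ((hFmem _).1 hmem)
        · rw [if_neg hmem] at hne
          exact inv.labOk x y hx hy hne
      · intro x y hx hy hne
        rw [hlabF x y hx hy] at hne ⊢
        by_cases hmem : (x, y) ∈ seenF
        · rw [if_pos hmem]
          have := inv.area1
          simp only
          omega
        · rw [if_neg hmem] at hne ⊢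
          have := inv.labLt x y hx hy hne
          simp only
          omega
      · intro l hl1 hl2
        simp only at hl2
        by_cases hlarea : l = st.2.2
        · subst hlarea
          exact ⟨c, hOkc, fun x y hx hy => hcompA x y hx hy⟩
        · have hl2' : l < st.2.2 := by omega
          obtain ⟨s, hsok, hs⟩ := inv.comp l hl1 hl2'
          refine ⟨s, hsok, fun x y hx hy => ?_⟩
          rw [← hs x y hx hy]
          rw [hlabF x y hx hy]
          by_cases hmem : (x, y) ∈ seenF
          · rw [if_pos hmem]
            have hz := hfresh (x, y) ((hFmem _).1 hmem)
            constructor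
            · intro h; omega
            · intro h; rw [hz] at h; omega
          · rw [if_neg hmem]
      · intro l hl1 hl2
        simp only at hl2 ⊢
        rw [PySem.Dict.getD_insert]
        by_cases hlarea : l = st.2.2
        · subst hlarea
          rw [if_pos rfl, hcnt]
          congr 1
          apply pvLen_eq seenF _ hFnd ((pvNodup_cells n m).filter _)
          intro p
          rw [List.mem_filter, pvMem_cells]
          constructor
          · intro hp
            have hre := (hFmem p).1 hp
            obtain ⟨a1, a2, a3, a4, -⟩ := pvReach_ok land n m c p hOkc hre
            refine ⟨⟨a1, a2, a3, a4⟩, ?_⟩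
            rw [decide_eq_true_iff]
            exact (hcompA p.1 p.2 a1 a3).2 hre
          · rintro ⟨⟨a1, a2, a3, a4⟩, hp⟩
            rw [decide_eq_true_iff] at hp
            exact (hFmem p).2 ((hcompA p.1 p.2 a1 a3).1 hp)
        · rw [if_neg hlarea]
          have hl2' : l < st.2.2 := by omega
          rw [inv.cnts l hl1 hl2']
          congr 2
          apply List.filter_congr
          intro p hp
          obtain ⟨a1, -, a3, -⟩ := (pvMem_cells n m p).1 hp
          rw [decide_eq_decide]
          rw [hlabF p.1 p.2 a1 a3]
          simp only [Prod.mk.eta]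
          by_cases hmem : p ∈ seenF
          · rw [if_pos hmem]
            have hz := hfresh p ((hFmem p).1 hmem)
            constructor <;> (intro h; omega)
          · rw [if_neg hmem]
    · intro _
      have hcm : cellA r.1 c.1 c.2 = st.2.2 :=
        (hcompA c.1 c.2 hc.1 hc.2.2.1).2 Relation.ReflTransGen.refl
      rw [hcm]
      exact harea

lemma pvScan_run (land : List (List Int)) (n m : Int) (hn : 0 ≤ n) (hm : 0 ≤ m) :
    ∀ (cells : List (Int × Int)),
      (∀ c ∈ cells, 0 ≤ c.1 ∧ c.1 < n ∧ 0 ≤ c.2 ∧ c.2 < m) →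
      ∀ st, PvInv1 land n m st →
        PvInv1 land n m (cells.foldl (scanCellA land n m) st) ∧
        (∀ x y, 0 ≤ x → 0 ≤ y → cellA st.1 x y ≠ 0 →
          cellA (cells.foldl (scanCellA land n m) st).1 x y = cellA st.1 x y) ∧
        (∀ c ∈ cells, cellA land c.1 c.2 ≠ 0 →
          cellA (cells.foldl (scanCellA land n m) st).1 c.1 c.2 ≠ 0) := by
  intro cells
  induction cells with
  | nil => exact fun _ st inv => ⟨inv, fun x y _ _ _ => rfl, by simp⟩
  | cons c t ih =>
    intro hcells st inv
    obtain ⟨inv1, hmono1, hlab1⟩ := pvScan_step land n m hn hm st c (hcells c (by simp)) inv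
    obtain ⟨inv2, hmono2, hlab2⟩ := ih (fun c' hc' => hcells c' (by simp [hc'])) _ inv1
    rw [List.foldl_cons]
    refine ⟨inv2, ?_, ?_⟩
    · intro x y hx hy hne
      rw [hmono2 x y hx hy (by rw [hmono1 x y hx hy hne]; exact hne),
        hmono1 x y hx hy hne]
    · intro c' hc' hoil
      rcases List.mem_cons.1 hc' with rfl | hc'
      · have h1 := hlab1 hoil
        obtain ⟨a1, -, a3, -⟩ := hcells c' (by simp)
        rw [hmono2 c'.1 c'.2 a1 a3 h1]
        exact h1
      · exact hlab2 c' hc' hoil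

-- ---------- phase 2: per-column totals ----------

lemma pvOils_spec (f : Int → Int) :
    ∀ (l : List Int) (acc : List Int), acc.Nodup →
      (l.foldl (fun os i => if f i ≠ 0 ∧ ¬ f i ∈ os then os ++ [f i] else os) acc).Nodup ∧
      ∀ x, x ∈ l.foldl (fun os i => if f i ≠ 0 ∧ ¬ f i ∈ os then os ++ [f i] else os) acc ↔
        x ∈ acc ∨ (x ≠ 0 ∧ ∃ i ∈ l, f i = x) := by
  intro l
  induction l with
  | nil => intro acc hacc; simpa using hacc
  | cons i t ih =>
    intro acc hacc
    simp only [List.foldl_cons]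
    by_cases hcond : f i ≠ 0 ∧ ¬ f i ∈ acc
    · rw [if_pos hcond]
      obtain ⟨hnd, hmem⟩ := ih (acc ++ [f i])
        (by
          refine List.Nodup.append hacc (by simp) ?_
          intro a ha hb
          rw [List.mem_singleton] at hb
          subst hb
          exact hcond.2 ha)
      refine ⟨hnd, fun x => ?_⟩
      rw [hmem x]
      simp only [List.mem_append, List.mem_singleton]
      constructor
      · rintro ((h | rfl) | ⟨hx, j, hj, rfl⟩)
        · exact Or.inl h
        · exact Or.inr ⟨hcond.1, i, by simp, rfl⟩
        · exact Or.inr ⟨hx, j, by simp [hj], rfl⟩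
      · rintro (h | ⟨hx, j, hj, rfl⟩)
        · exact Or.inl (Or.inl h)
        · rcases List.mem_cons.1 hj with rfl | hj
          · exact Or.inl (Or.inr rfl)
          · exact Or.inr ⟨hx, j, hj, rfl⟩
    · rw [if_neg hcond]
      obtain ⟨hnd, hmem⟩ := ih acc hacc
      refine ⟨hnd, fun x => ?_⟩
      rw [hmem x]
      constructor
      · rintro (h | ⟨hx, j, hj, rfl⟩)
        · exact Or.inl h
        · exact Or.inr ⟨hx, j, by simp [hj], rfl⟩
      · rintro (h | ⟨hx, j, hj, rfl⟩)
        · exact Or.inl h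
        · rcases List.mem_cons.1 hj with rfl | hj
          · rcases not_and_or.1 hcond with h' | h'
            · exact absurd (not_not.1 h') hx
            · exact Or.inl (not_not.1 h')
          · exact Or.inr ⟨hx, j, hj, rfl⟩

lemma pvSumCast : ∀ (l : List Nat), ((l.map (fun k : Nat => (k : Int))).sum) = ((l.sum : Nat) : Int) := by
  intro l
  induction l with
  | nil => simp
  | cons a t ih =>
    simp only [List.map_cons, List.sum_cons, ih]
    push_cast
    ring

lemma pvCol_spec (land : List (List Int)) (n m : Int) (hn : 0 ≤ n) (hm : 0 ≤ m)
    (G : List (List Int)) (cnts : PySem.Dict Int Int) (area : Int)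
    (inv : PvInv1 land n m (G, cnts, area))
    (halab : ∀ p : Int × Int, pvOk land n m p → cellA G p.1 p.2 ≠ 0)
    (c : Int) (hc1 : 0 ≤ c) (hc2 : c < m) :
    ((PySem.List.pyRange 0 n 1).foldl (fun os i =>
        if cellA G i c ≠ 0 ∧ ¬ (cellA G i c) ∈ os then os ++ [cellA G i c] else os) []).foldl
      (fun a o => a + cnts.getD o 0) 0
    = PySem.Set.len (growB land n m (n.toNat * m.toNat + 2)
        ((PySem.List.pyRange 0 n 1).foldl (fun s i =>
          if cellB land i c ≠ 0 then PySem.Set.add s (i, c) else s) PySem.Set.empty)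
        ((PySem.List.pyRange 0 n 1).foldl (fun s i =>
          if cellB land i c ≠ 0 then PySem.Set.add s (i, c) else s) PySem.Set.empty)) := by
  -- the seed set of column c
  obtain ⟨hseednd, hseedmem⟩ := pvFoldAdd (fun i : Int => (i, c))
    (fun i : Int => cellB land i c ≠ 0) (PySem.List.pyRange 0 n 1) PySem.Set.empty List.nodup_nil
  set seed := (PySem.List.pyRange 0 n 1).foldl (fun s i =>
    if cellB land i c ≠ 0 then PySem.Set.add s (i, c) else s) PySem.Set.empty with hseed
  have hseedmem' : ∀ x : Int × Int, x ∈ seed ↔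
      (0 ≤ x.1 ∧ x.1 < n ∧ x.2 = c ∧ cellA land x.1 x.2 ≠ 0) := by
    intro x
    rw [hseedmem x]
    simp only [PySem.Set.empty, List.not_mem_nil, false_or, PySem.List.mem_pyRange_one]
    rw [pvCellB_eq]
    constructor
    · rintro ⟨i, hi, hC, rfl⟩
      exact ⟨hi.1, hi.2, rfl, hC⟩
    · rintro ⟨h1, h2, h3, h4⟩
      refine ⟨x.1, ⟨h1, h2⟩, ?_, ?_⟩
      · rw [← h3]; exact h4
      · rw [← h3]
  have hseedok : ∀ p ∈ seed, pvOk land n m p := by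
    intro p hp
    obtain ⟨h1, h2, h3, h4⟩ := (hseedmem' p).1 hp
    exact ⟨h1, h2, by omega, by omega, h4⟩
  -- run the flood fill
  obtain ⟨hFnd, hFmem⟩ := pvGrowB_run land n m seed (n.toNat * m.toNat + 2) seed seed
    (by
      refine ⟨hseednd, fun p hp => hp, fun p hp => hp, hseedok, ?_, ?_⟩
      · exact fun p hp => ⟨p, hp, Relation.ReflTransGen.refl⟩
      · exact fun p hp hnp => absurd hp hnp)
    (fun _ => by omega) (fun _ => by omega)
  set F := growB land n m (n.toNat * m.toNat + 2) seed seed with hF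
  -- the distinct labels of column c
  obtain ⟨hond, homem⟩ := pvOils_spec (fun i => cellA G i c) (PySem.List.pyRange 0 n 1) [] (by simp)
  set oils := (PySem.List.pyRange 0 n 1).foldl (fun os i =>
    if cellA G i c ≠ 0 ∧ ¬ (cellA G i c) ∈ os then os ++ [cellA G i c] else os) [] with hoils
  have homem' : ∀ x, x ∈ oils ↔ (x ≠ 0 ∧ ∃ i, 0 ≤ i ∧ i < n ∧ cellA G i c = x) := by
    intro x
    rw [homem x]
    simp only [List.not_mem_nil, false_or, PySem.List.mem_pyRange_one]
    constructor
    · rintro ⟨hx, i, hi, rfl⟩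
      exact ⟨hx, i, hi.1, hi.2, rfl⟩
    · rintro ⟨hx, i, h1, h2, h3⟩
      exact ⟨hx, i, ⟨h1, h2⟩, h3⟩
  have hoil_range : ∀ o ∈ oils, 1 ≤ o ∧ o < area := by
    intro o ho
    obtain ⟨hne, i, h1, h2, h3⟩ := (homem' o).1 ho
    have := inv.labLt i c h1 hc1 (by rw [h3]; exact hne)
    simp only at this
    omega
  -- A's sum is the length of the flattened class lists
  have hsum : oils.foldl (fun a o => a + cnts.getD o 0) 0
      = (((oils.map (pvClass n m G)).flatten).length : Int) := by
    rw [PySem.List.foldl_add]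
    have h1 : oils.map (fun o => cnts.getD o 0)
        = oils.map (fun o => ((pvClass n m G o).length : Int)) := by
      apply List.map_congr_left
      intro o ho
      have := inv.cnts o (hoil_range o ho).1 (hoil_range o ho).2
      simpa using this
    rw [h1]
    have h2 : oils.map (fun o => ((pvClass n m G o).length : Int))
        = ((oils.map (pvClass n m G)).map List.length).map (fun k : Nat => (k : Int)) := by
      simp [List.map_map, Function.comp]
    rw [h2, pvSumCast, List.length_flatten]
    simp
  rw [hsum]
  -- F and the flattened class lists have the same members
  have hmemiff : ∀ x : Int × Int, x ∈ (oils.map (pvClass n m G)).flatten ↔ x ∈ F := by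
    intro x
    rw [hFmem x, List.mem_flatten]
    constructor
    · rintro ⟨L, hL, hxL⟩
      obtain ⟨o, ho, rfl⟩ := List.mem_map.1 hL
      obtain ⟨hxc, hxlab⟩ := List.mem_filter.1 hxL
      rw [decide_eq_true_iff] at hxlab
      obtain ⟨hne, i0, hi1, hi2, hi3⟩ := (homem' o).1 ho
      obtain ⟨ho1, ho2⟩ := hoil_range o ho
      obtain ⟨s, hsok, hs⟩ := inv.comp o ho1 ho2
      obtain ⟨a1, -, a3, -⟩ := (pvMem_cells n m x).1 hxc
      have hrsx : pvReach land n m s x := (hs x.1 x.2 a1 a3).1 hxlab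
      have hrsi : pvReach land n m s (i0, c) := (hs i0 c hi1 hc1).1 hi3
      have hoil : cellA land i0 c ≠ 0 := by
        have := inv.labOk i0 c hi1 hc1 (by rw [hi3]; exact hne)
        exact this.2.2.2.2
      refine ⟨(i0, c), (hseedmem' (i0, c)).2 ⟨hi1, hi2, rfl, hoil⟩, ?_⟩
      exact (pvReach_symm land n m s (i0, c) hrsi).trans hrsx
    · rintro ⟨sd, hsd, hreach⟩
      obtain ⟨h1, h2, h3, h4⟩ := (hseedmem' sd).1 hsd
      have hsdok : pvOk land n m sd := ⟨h1, h2, by omega, by omega, h4⟩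
      have hGsd : cellA G sd.1 sd.2 ≠ 0 := halab sd hsdok
      have hrange := inv.labLt sd.1 sd.2 h1 (by omega) hGsd
      simp only at hrange
      obtain ⟨s, hsok, hs⟩ := inv.comp (cellA G sd.1 sd.2) hrange.1 hrange.2
      have hxok : pvOk land n m x := pvReach_ok land n m sd x hsdok hreach
      have hssd : pvReach land n m s sd := (hs sd.1 sd.2 h1 (by omega)).1 rfl
      have hGx : cellA G x.1 x.2 = cellA G sd.1 sd.2 :=
        (hs x.1 x.2 hxok.1 hxok.2.2.1).2 (hssd.trans hreach)
      refine ⟨pvClass n m G (cellA G sd.1 sd.2), ?_, ?_⟩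
      · apply List.mem_map_of_mem
        apply (homem' _).2
        exact ⟨hGsd, sd.1, h1, h2, by rw [← h3]⟩
      · rw [pvClass, List.mem_filter, decide_eq_true_iff]
        exact ⟨(pvMem_cells n m x).2 ⟨hxok.1, hxok.2.1, hxok.2.2.1, hxok.2.2.2.1⟩, hGx⟩
  -- nodup of the flattened class lists
  have hflnd : ((oils.map (pvClass n m G)).flatten).Nodup := by
    rw [List.nodup_flatten]
    constructor
    · intro xs hxs
      obtain ⟨o, -, rfl⟩ := List.mem_map.1 hxs
      exact (pvNodup_cells n m).filter _
    · rw [List.pairwise_map]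
      refine List.Pairwise.imp ?_ hond
      intro o1 o2 hne x hx1 hx2
      obtain ⟨-, hl1⟩ := List.mem_filter.1 hx1
      obtain ⟨-, hl2⟩ := List.mem_filter.1 hx2
      rw [decide_eq_true_iff] at hl1 hl2
      exact hne (hl1 ▸ hl2 ▸ rfl)
  -- conclude
  have hlen : ((oils.map (pvClass n m G)).flatten).length = F.length :=
    pvLen_eq _ _ hflnd hFnd hmemiff
  rw [hlen]
  simp [PySem.Set.len]

-- ---------- assembly ----------

lemma pvInit_cell (n m : Int) (x y : Int) :
    cellA ((PySem.List.pyRange 0 n 1).map (fun _ => List.replicate m.toNat (0 : Int))) x y = 0 := by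
  unfold cellA
  by_cases hin : PySem.Raise.InRange ((PySem.List.pyRange 0 n 1).map
      (fun _ => List.replicate m.toNat (0 : Int))).length x
  · have hmem := PySem.List.pyGetD_mem ((PySem.List.pyRange 0 n 1).map
      (fun _ => List.replicate m.toNat (0 : Int))) ([] : List Int) hin
    obtain ⟨-, -, hEq⟩ := List.mem_map.1 hmem
    rw [← hEq]
    by_cases hin2 : PySem.Raise.InRange (List.replicate m.toNat (0 : Int)).length y
    · have hmem2 := PySem.List.pyGetD_mem (List.replicate m.toNat (0 : Int)) (0 : Int) hin2
      exact List.eq_of_mem_replicate hmem2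
    · exact PySem.List.pyGetD_of_none _ _ _ ((PySem.List.pyGet?_eq_none_iff _ _).2 hin2)
  · rw [PySem.List.pyGetD_of_none _ _ _ ((PySem.List.pyGet?_eq_none_iff _ _).2 hin)]
    by_cases hin2 : PySem.Raise.InRange ([] : List Int).length y
    · simp [PySem.Raise.InRange] at hin2
      omega
    · exact PySem.List.pyGetD_of_none _ _ _ ((PySem.List.pyGet?_eq_none_iff _ _).2 hin2)

lemma pvMain (land : List (List Int)) : solution land = solution_alt land := by
  unfold solution solution_alt
  dsimp only
  set N : Int := PySem.List.len land with hN
  set M : Int := PySem.List.len ((PySem.List.pyGet? land 0).getD []) with hM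
  have hn : 0 ≤ N := by rw [hN, PySem.List.len_eq]; positivity
  have hm : 0 ≤ M := by rw [hM, PySem.List.len_eq]; positivity
  set init := (PySem.List.pyRange 0 N 1).map (fun _ => List.replicate M.toNat (0 : Int)) with hinit
  have hish : pvShape N M init := by
    constructor
    · rw [hinit, List.length_map, PySem.List.length_pyRange_one]
      simp
    · intro r hr
      rw [hinit] at hr
      obtain ⟨-, -, rfl⟩ := List.mem_map.1 hr
      simp
  have hinv0 : PvInv1 land N M (init, PySem.Dict.empty, 1) := by
    refine ⟨hish, le_refl _, ?_, ?_, ?_, ?_⟩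
    · intro x y hx hy hne
      exact absurd (pvInit_cell N M x y) hne
    · intro x y hx hy hne
      exact absurd (pvInit_cell N M x y) hne
    · intro l hl1 hl2
      simp only at hl2
      omega
    · intro l hl1 hl2
      simp only at hl2
      omega
  -- the double scan is the scan over the row-major cell list
  have hnest : (PySem.List.pyRange 0 N 1).foldl
      (fun st i => (PySem.List.pyRange 0 M 1).foldl
        (fun st j => scanCellA land N M st (i, j)) st)
      (init, PySem.Dict.empty, 1)
      = (pvCells N M).foldl (scanCellA land N M) (init, PySem.Dict.empty, 1) := by
    rw [pvCells, List.foldl_flatMap]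
    simp only [List.foldl_map]
  obtain ⟨hinv, -, hlaball⟩ := pvScan_run land N M hn hm (pvCells N M)
    (fun c hc => by
      obtain ⟨a1, a2, a3, a4⟩ := (pvMem_cells N M c).1 hc
      exact ⟨a1, a2, a3, a4⟩)
    (init, PySem.Dict.empty, 1) hinv0
  set ST := (pvCells N M).foldl (scanCellA land N M) (init, PySem.Dict.empty, 1) with hST
  have halab : ∀ p : Int × Int, pvOk land N M p → cellA ST.1 p.1 p.2 ≠ 0 := by
    intro p hp
    exact hlaball p ((pvMem_cells N M p).2 ⟨hp.1, hp.2.1, hp.2.2.1, hp.2.2.2.1⟩) hp.2.2.2.2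
  rw [hnest]
  apply PySem.List.foldl_congr_mem
  intro acc c hcmem
  obtain ⟨hc1, hc2⟩ := (PySem.List.mem_pyRange_one).1 hcmem
  have hinv' : PvInv1 land N M (ST.1, ST.2.1, ST.2.2) := by
    have : ST = (ST.1, ST.2.1, ST.2.2) := rfl
    rwa [← this]
  have := pvCol_spec land N M hn hm ST.1 ST.2.1 ST.2.2 hinv' halab c hc1 hc2
  rw [this]
  exact max_comm _ _

-- ===== VERDICT (by name: the statement is the Claim_ definition above) =====
theorem solution_spec : Claim_equal_solution := by
  intro land _ _
  unfold Spec_solution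
  exact pvMain land
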